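-- pv_equiv track=rewrite | github.com/abbyinkr/Algorithm | 프로그래머스/0/181874. A 강조하기/A 강조하기.py | solution
-- ===== SOURCE A (Python) =====
-- def solution(myString):
--     arr = []
--     for c in myString:
--         if c == "a":
--             arr.append("A")
--         elif c != "A" and c.isupper():
--             arr.append(c.lower())
--         else:
--             arr.append(c)
--     return ''.join(arr)
-- ===== SOURCE B (Python) =====
-- def solution(myString):
--     return myString.lower().replace('a', 'A')
-- ===== Notes on version B (the rewrite author's own statement) =====
-- stated objective: simpler
-- what changed: Replaced the per-character branching loop with an accumulator list by two whole-string passes: lower() to normalize case, then replace('a','A') to upcase the one letter that must be uppercase; the C-level string methods avoid the Python-level per-character loop.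
import Mathlib
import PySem

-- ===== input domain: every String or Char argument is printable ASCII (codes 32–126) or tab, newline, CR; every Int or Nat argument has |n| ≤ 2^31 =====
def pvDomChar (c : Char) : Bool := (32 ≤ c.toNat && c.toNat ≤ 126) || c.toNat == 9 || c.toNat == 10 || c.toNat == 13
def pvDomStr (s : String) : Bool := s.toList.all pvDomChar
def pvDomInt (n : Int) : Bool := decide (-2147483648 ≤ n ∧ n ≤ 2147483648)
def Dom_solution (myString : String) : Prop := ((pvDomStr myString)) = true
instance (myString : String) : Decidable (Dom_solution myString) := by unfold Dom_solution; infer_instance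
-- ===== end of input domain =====

-- B replaces A's per-character branching loop by two whole-string passes: lower() then replace('a','A') (simpler).

-- ===== PORT A =====
-- per character: "a" → "A"; other uppercase → its lowercase; else unchanged; appended to arr, joined
def solution (myString : String) : String :=
  String.ofList
    (myString.toList.foldl
      (fun arr c =>
        arr ++ (if c = 'a' then ['A']
                else if c ≠ 'A' ∧ PySem.Chars.isupper c = true then [PySem.Chars.lowerChar c]
                else [c]))
      [])

-- ===== PORT B =====
def solution_alt (myString : String) : String :=
  PySem.Str.replace (PySem.Str.lower myString) "a" "A"

-- ===== PRECONDITION & SPEC =====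
def Spec_solution (myString : String) (out : String) : Prop := out = solution_alt myString
instance (myString : String) (out : String) : Decidable (Spec_solution myString out) := by unfold Spec_solution; infer_instance

-- ===== CLAIM (what is proved, stated in full; the proofs are below) =====
def Claim_equal_solution : Prop := ∀ (myString : String), Dom_solution myString → Spec_solution myString (solution myString)

-- ===== LEMMAS AND PROOFS =====

-- the single-character replace is a map
theorem replace_go_single (t : List Char) : ∀ (fuel : Nat) (acc : List Char), t.length ≤ fuel →
    PySem.Chars.replace.go ['a'] ['A'] fuel t acc
      = acc.reverse ++ t.map (fun c => if c = 'a' then 'A' else c) := by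
  induction t with
  | nil =>
    intro fuel acc _
    cases fuel <;> simp [PySem.Chars.replace.go]
  | cons c t ih =>
    intro fuel acc h
    cases fuel with
    | zero => simp at h
    | succ n =>
      simp only [PySem.Chars.replace.go]
      by_cases hc : c = 'a'
      · subst hc
        have : List.isPrefixOf ['a'] ('a' :: t) = true := by simp [List.isPrefixOf]
        rw [if_pos this]
        have := ih n (['A'].reverse ++ acc) (by simpa using Nat.le_of_succ_le_succ h)
        simpa using this
      · have : List.isPrefixOf ['a'] (c :: t) = false := by
          simp [List.isPrefixOf]; exact fun h => hc h.symm
        rw [this]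
        simp only [Bool.false_eq_true, if_false]
        have := ih n (c :: acc) (Nat.le_of_succ_le_succ h)
        simpa [hc] using this

theorem replace_single (s : List Char) :
    PySem.Chars.replace s ['a'] ['A'] = s.map (fun c => if c = 'a' then 'A' else c) := by
  simp only [PySem.Chars.replace, List.isEmpty_cons, Bool.false_eq_true, if_false]
  simpa using replace_go_single s s.length [] le_rfl

-- per-character agreement of the two transforms
theorem char_agree (c : Char) :
    (if c = 'a' then ['A']
     else if c ≠ 'A' ∧ PySem.Chars.isupper c = true then [PySem.Chars.lowerChar c]
     else [c])
      = [if PySem.Chars.lowerChar c = 'a' then 'A' else PySem.Chars.lowerChar c] := by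
  by_cases h1 : c = 'a'
  · subst h1; simp [PySem.Chars.lowerChar, PySem.Chars.isupper]
  · by_cases h2 : PySem.Chars.isupper c = true
    · by_cases h3 : c = 'A'
      · subst h3; simp [PySem.Chars.lowerChar, PySem.Chars.isupper]
      · have hA : PySem.Chars.lowerChar c ≠ 'a' := by
          simp only [PySem.Chars.isupper, Bool.and_eq_true, decide_eq_true_eq] at h2
          obtain ⟨hge, hle⟩ := h2
          have hlo : 65 ≤ c.toNat := hge
          have hhi : c.toNat ≤ 90 := hle
          have hne : c.toNat ≠ 65 := fun h => h3 (Char.ext (by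
            have : c.toNat = ('A' : Char).toNat := by simpa using h
            exact UInt32.toNat_inj.mp this))
          have hval : Nat.isValidChar (c.toNat + 32) := Or.inl (by omega)
          simp only [PySem.Chars.lowerChar, PySem.Chars.isupper, hge, hle, decide_true,
            Bool.and_self, if_pos]
          intro hcontra
          have hc2 := congrArg Char.toNat hcontra
          rw [show (Char.ofNat (c.toNat + 32)).toNat = c.toNat + 32 by
            simp [Char.ofNat, hval, Char.ofNatAux]; omega] at hc2
          have : c.toNat + 32 = 97 := by simpa using hc2
          omega
        simp [h1, h2, h3, hA]
    · have hl : PySem.Chars.lowerChar c = c := by simp [PySem.Chars.lowerChar, h2]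
      simp [h1, h2, hl]

-- ===== VERDICT (by name: the statement is the Claim_ definition above) =====
theorem solution_spec : Claim_equal_solution := by
  intro s _
  unfold Spec_solution solution solution_alt
  apply String.ext
  have hfold : ∀ (l init : List Char),
      l.foldl (fun arr c =>
        arr ++ (if c = 'a' then ['A']
                else if c ≠ 'A' ∧ PySem.Chars.isupper c = true then [PySem.Chars.lowerChar c]
                else [c])) init
        = init ++ l.map (fun c => if PySem.Chars.lowerChar c = 'a' then 'A' else PySem.Chars.lowerChar c) := by
    intro l
    induction l with
    | nil => simp
    | cons c t ih =>
      intro init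
      simp only [List.foldl_cons, List.map_cons, ih, char_agree c, List.append_assoc,
        List.singleton_append]
  have hB : (PySem.Str.replace (PySem.Str.lower s) "a" "A").toList
      = (PySem.Chars.lower s.toList).map (fun c => if c = 'a' then 'A' else c) := by
    rw [PySem.Str.toList_replace]
    simp only [PySem.Str.toList_lower]
    have : ("a" : String).toList = ['a'] := by decide
    have hA : ("A" : String).toList = ['A'] := by decide
    rw [this, hA, replace_single]
  rw [hB]
  simp [hfold, PySem.Chars.lower, Function.comp_def]
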